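-- pv_equiv track=rewrite | github.com/Aqudi/Today_ps | Programmers/배상비용최소화.py | solution
-- ===== SOURCE A (Python) =====
-- def solution(no, works):
--     for i in range(no):
--         works = sorted(works, reverse=True)
--         works[0] -= 1
--
--     result = 0
--     for w in works:
--         if w > 0:
-- 	        result += w ** 2
--
--     if result < 0:
--         result = 0
--     return result
-- ===== SOURCE B (Python) =====
-- def solution(no, works):
--     # Water-draining closed form: binary-search the final cap level instead of
--     # simulating 'no' single decrements of the current maximum.
--     k = no if no > 0 else 0
--     if k == 0 or not works:
--         return sum(w * w for w in works if w > 0)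
--
--     def over(level):
--         # total number of unit reductions needed to cap every pile at 'level'
--         return sum(w - level for w in works if w > level)
--
--     hi = max(works)
--     lo = hi - k
--     while lo < hi:
--         mid = (lo + hi) // 2
--         if over(mid) <= k:
--             hi = mid
--         else:
--             lo = mid + 1
--     level = lo                      # smallest level reachable with k reductions
--     r = k - over(level)             # leftover reductions: r piles drop one more
--     c = sum(1 for w in works if w >= level)
--     total = sum(w * w for w in works if 0 < w < level)
--     if level > 1:
--         total += r * (level - 1) * (level - 1)
--     if level > 0:
--         total += (c - r) * level * level
--     return total
-- ===== Notes on version B (the rewrite author's own statement) =====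
-- stated objective: faster
-- what changed: Replaces the per-unit simulation (re-sort, decrement the maximum, repeat no times) by a binary search for the final cap level plus a closed-form redistribution of the leftover reductions.
import Mathlib
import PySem

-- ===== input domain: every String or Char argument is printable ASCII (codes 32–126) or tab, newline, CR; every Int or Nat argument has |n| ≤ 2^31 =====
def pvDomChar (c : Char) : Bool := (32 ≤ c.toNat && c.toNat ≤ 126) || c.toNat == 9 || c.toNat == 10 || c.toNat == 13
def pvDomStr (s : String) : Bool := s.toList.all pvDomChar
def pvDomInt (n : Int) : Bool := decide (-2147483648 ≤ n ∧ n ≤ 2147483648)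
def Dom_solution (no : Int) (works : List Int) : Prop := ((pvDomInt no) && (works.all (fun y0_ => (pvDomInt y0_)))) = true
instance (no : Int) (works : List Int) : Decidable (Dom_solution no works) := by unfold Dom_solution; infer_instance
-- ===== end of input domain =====

-- B replaces A's per-unit simulation (re-sort, decrement the max, no times) by a binary
-- search on the final cap level plus closed-form redistribution of leftover reductions.


-- ===== PORT A =====
-- loop body of A: works = sorted(works, reverse=True); works[0] -= 1
-- (on [], works[0] raises IndexError — those inputs are excluded by Pre_solution)
def stepA (ws : List Int) : List Int :=
  match PySem.List.sorted ws (fun x => x) true with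
  | [] => []
  | h :: t => (h - 1) :: t

def solution (no : Int) (works : List Int) : Int :=
  let final := (PySem.List.pyRange 0 no 1).foldl (fun ws _ => stepA ws) works
  let result := final.foldl (fun acc w => if 0 < w then acc + w ^ 2 else acc) 0
  if result < 0 then 0 else result

-- ===== PORT B =====
-- over(level) of Source B: total unit reductions needed to cap every pile at `level`
def overB (works : List Int) (level : Int) : Int :=
  ((works.filter (fun w => level < w)).map (fun w => w - level)).sum

-- the while-loop of Source B (mid = (lo + hi) // 2 inlined)
def bsearchB (works : List Int) (k lo hi : Int) : Int :=
  if lo < hi then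
    if overB works (PySem.Int.floordiv (lo + hi) 2) ≤ k then
      bsearchB works k lo (PySem.Int.floordiv (lo + hi) 2)
    else
      bsearchB works k (PySem.Int.floordiv (lo + hi) 2 + 1) hi
  else lo
termination_by (hi - lo).toNat
decreasing_by
  all_goals
    have h1 := PySem.Int.floordiv_two_mid_bounds (le_of_lt (by omega : lo < hi))
    have h2 : PySem.Int.floordiv (lo + hi) 2 < hi :=
      (PySem.Int.floordiv_lt_iff_lt_mul (by omega : (0:Int) < 2)).mpr (by omega)
    omega

def solution_alt (no : Int) (works : List Int) : Int :=
  let k := if 0 < no then no else 0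
  if k = 0 ∨ works = [] then
    ((works.filter (fun w => 0 < w)).map (fun w => w * w)).sum
  else
    match PySem.List.max? works (fun x => x) with
    | none => 0   -- unreachable: works ≠ [] in this branch
    | some hi =>
      let lo := hi - k
      let level := bsearchB works k lo hi
      let r := k - overB works level
      let c : Int := (works.filter (fun w => level ≤ w)).length
      let total := ((works.filter (fun w => 0 < w ∧ w < level)).map (fun w => w * w)).sum
      let total := if 1 < level then total + r * (level - 1) * (level - 1) else total
      let total := if 0 < level then total + (c - r) * level * level else total
      total

-- ===== PRECONDITION & SPEC =====
-- A raises IndexError (works[0] on an empty list) iff works = [] and no > 0; only those inputs are excluded.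
def Pre_solution (no : Int) (works : List Int) : Prop := works ≠ [] ∨ no ≤ 0
instance (no : Int) (works : List Int) : Decidable (Pre_solution no works) := by unfold Pre_solution; infer_instance
def pvWitness_solution : Int × List Int := (2, [3, 1])

def Spec_solution (no : Int) (works : List Int) (out : Int) : Prop := out = solution_alt no works
instance (no : Int) (works : List Int) (out : Int) : Decidable (Spec_solution no works out) := by unfold Spec_solution; infer_instance

-- ===== CLAIM (what is proved, stated in full; the proofs are below) =====
def Claim_equal_solution : Prop := ∀ (no : Int) (works : List Int), Dom_solution no works → Pre_solution no works → Spec_solution no works (solution no works)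

-- ===== LEMMAS AND PROOFS =====

-- spec-side quantities (on multisets: A's loop state is determined only up to permutation)
def ov (M : Multiset Int) (L : Int) : Int := (M.map (fun w => max (w - L) 0)).sum
def cnt (M : Multiset Int) (L : Int) : Nat := (M.filter (fun w => L ≤ w)).card
def sqi (w : Int) : Int := if 0 < w then w * w else 0
def sqsum (M : Multiset Int) : Int := (M.map sqi).sum
-- the multiset after k unit decrements of the max, when L is the least level with ov M L ≤ k
def Dcfg (M : Multiset Int) (L : Int) (r : Nat) : Multiset Int :=
  M.filter (fun w => w < L) + Multiset.replicate r (L - 1) + Multiset.replicate (cnt M L - r) L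

theorem ov_nonneg (M : Multiset Int) (L : Int) : 0 ≤ ov M L := by
  refine Multiset.sum_nonneg fun x hx => ?_
  obtain ⟨w, _, rfl⟩ := Multiset.mem_map.mp hx
  exact le_max_right _ _

theorem ov_cons (a : Int) (M : Multiset Int) (K : Int) :
    ov (a ::ₘ M) K = max (a - K) 0 + ov M K := by
  simp [ov]

theorem cnt_cons (a : Int) (M : Multiset Int) (K : Int) :
    (cnt (a ::ₘ M) K : Int) = (cnt M K : Int) + (if K ≤ a then 1 else 0) := by
  simp only [cnt, Multiset.filter_cons]
  split_ifs <;> simp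

theorem ov_pred (M : Multiset Int) (L : Int) : ov M (L - 1) = ov M L + (cnt M L : Int) := by
  induction M using Multiset.induction_on with
  | empty => simp [ov, cnt]
  | cons a M ih =>
    rw [ov_cons, ov_cons, cnt_cons, ih]
    by_cases h : L ≤ a
    · rw [max_eq_left (by omega : (0:Int) ≤ a - (L - 1)),
        max_eq_left (by omega : (0:Int) ≤ a - L), if_pos h]
      ring
    · rw [max_eq_right (by omega : a - (L - 1) ≤ (0:Int)),
        max_eq_right (by omega : a - L ≤ (0:Int)), if_neg h]
      ring

theorem cnt_succ (M : Multiset Int) (L : Int) : cnt M L = cnt M (L + 1) + M.count L := by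
  induction M using Multiset.induction_on with
  | empty => simp [cnt]
  | cons a M ih =>
    have e1 := cnt_cons a M L
    have e2 := cnt_cons a M (L + 1)
    have e3 : Multiset.count L (a ::ₘ M) = Multiset.count L M + if L = a then 1 else 0 :=
      Multiset.count_cons L a M
    have := ih
    split_ifs at e1 e2 e3 <;> omega

theorem ov_eq_zero_of_le (M : Multiset Int) (L : Int) (h : ∀ w ∈ M, w ≤ L) : ov M L = 0 := by
  refine Multiset.sum_eq_zero fun x hx => ?_
  obtain ⟨w, hw, rfl⟩ := Multiset.mem_map.mp hx
  exact max_eq_right (by have := h w hw; omega)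

theorem ov_eq_zero_le (M : Multiset Int) (L : Int) (h : ov M L = 0) : ∀ w ∈ M, w ≤ L := by
  induction M using Multiset.induction_on with
  | empty => simp
  | cons a M ih =>
    intro w hw
    have h0 := ov_nonneg M L
    have h2 : a - L ≤ max (a - L) 0 := le_max_left _ _
    have h3 : (0 : Int) ≤ max (a - L) 0 := le_max_right _ _
    rw [ov_cons] at h
    rcases Multiset.mem_cons.mp hw with rfl | hw'
    · omega
    · exact ih (by omega) w hw'

theorem le_ov_of_mem (M : Multiset Int) (L : Int) (w : Int) (hw : w ∈ M) :
    max (w - L) 0 ≤ ov M L := by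
  refine Multiset.single_le_sum (fun x hx => ?_) _ (Multiset.mem_map_of_mem _ hw)
  obtain ⟨v, _, rfl⟩ := Multiset.mem_map.mp hx
  exact le_max_right _ _

theorem overB_eq_ov (works : List Int) (L : Int) : overB works L = ov (↑works) L := by
  induction works with
  | nil => simp [overB, ov]
  | cons a l ih =>
    rw [show ((a :: l : List Int) : Multiset Int) = a ::ₘ ↑l from rfl, ov_cons]
    simp only [overB, List.filter_cons, decide_eq_true_eq] at ih ⊢
    by_cases h : L < a
    · rw [if_pos h, max_eq_left (by omega : (0:Int) ≤ a - L)]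
      simp only [List.map_cons, List.sum_cons]
      omega
    · rw [if_neg h, max_eq_right (by omega : a - L ≤ (0:Int))]
      omega

theorem cnt_coe (l : List Int) (L : Int) :
    (cnt (↑l) L : Int) = ((l.filter (fun w => L ≤ w)).length : Int) := by
  induction l with
  | nil => simp [cnt]
  | cons a l ih =>
    rw [show ((a :: l : List Int) : Multiset Int) = a ::ₘ ↑l from rfl, cnt_cons]
    simp only [List.filter_cons, decide_eq_true_eq]
    by_cases h : L ≤ a
    · rw [if_pos h, if_pos h]
      simp only [List.length_cons]
      omega
    · rw [if_neg h, if_neg h]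
      omega

theorem step_shape (ws : List Int) (hne : ws ≠ []) :
    ∃ h t, stepA ws = (h - 1) :: t ∧ (↑ws : Multiset Int) = h ::ₘ (↑t : Multiset Int) ∧
      ∀ y ∈ ws, y ≤ h := by
  cases hs : PySem.List.sorted ws (fun x => x) true with
  | nil => exact absurd ((PySem.List.sorted_eq_nil_iff ws (fun x => x) true).mp hs) hne
  | cons h t =>
    refine ⟨h, t, by simp [stepA, hs], ?_, PySem.List.key_head_sorted_rev_ge ws (fun x => x) hs⟩
    have hp : (h :: t).Perm ws := hs ▸ PySem.List.sorted_perm ws (fun x => x) true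
    calc (↑ws : Multiset Int) = ↑(h :: t) := (Multiset.coe_eq_coe.mpr hp).symm
    _ = h ::ₘ ↑t := rfl

theorem iter_ne_nil (works : List Int) (hne : works ≠ []) (k : Nat) :
    stepA^[k] works ≠ [] := by
  induction k with
  | zero => simpa
  | succ k ih =>
    rw [Function.iterate_succ_apply']
    obtain ⟨h, t, hstep, _, _⟩ := step_shape _ ih
    simp [hstep]

theorem max_of_Dcfg (M : Multiset Int) (L : Int) (r : Nat) (x : Int)
    (hx : x ∈ Dcfg M L r) : x ≤ L := by
  rcases Multiset.mem_add.mp hx with hx' | hx'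
  · rcases Multiset.mem_add.mp hx' with hx'' | hx''
    · have := (Multiset.mem_filter.mp hx'').2; omega
    · have := Multiset.eq_of_mem_replicate hx''; omega
  · have := Multiset.eq_of_mem_replicate hx'; omega

theorem L_mem_Dcfg (M : Multiset Int) (L : Int) (r : Nat) (hrc : r < cnt M L) :
    L ∈ Dcfg M L r := by
  refine Multiset.mem_add.mpr (Or.inr ?_)
  exact Multiset.mem_replicate.mpr ⟨by omega, rfl⟩

theorem iter_shape (works : List Int) (hne : works ≠ []) :
    ∀ (k : Nat) (L : Int), ov (↑works) L ≤ (k : Int) → (k : Int) < ov (↑works) (L - 1) →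
      (↑(stepA^[k] works) : Multiset Int) = Dcfg (↑works) L (((k : Int) - ov (↑works) L).toNat) := by
  intro k
  induction k with
  | zero =>
    intro L h1 h2
    have hz : ov (↑works) L = 0 := le_antisymm (by exact_mod_cast h1) (ov_nonneg _ _)
    have hle := ov_eq_zero_le (↑works) L hz
    have hcnt0 : cnt (↑works) (L + 1) = 0 := by
      have hf : Multiset.filter (fun w => L + 1 ≤ w) (↑works : Multiset Int) = 0 :=
        Multiset.filter_eq_nil.mpr (by intro a ha; have := hle a ha; omega)
      simp only [cnt, hf, Multiset.card_zero]
    have hsucc := cnt_succ (↑works) L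
    have hgt : ∀ a : Int, L < a → Multiset.count a (↑works : Multiset Int) = 0 := by
      intro a h
      refine Multiset.count_eq_zero.mpr fun hmem => ?_
      have := hle a hmem
      omega
    simp only [Function.iterate_zero_apply, Nat.cast_zero]
    rw [show ((0:Int) - ov (↑works) L).toNat = 0 from by omega]
    refine Multiset.ext.mpr fun a => ?_
    simp only [Dcfg, Multiset.count_add, Multiset.count_filter, Multiset.count_replicate,
      ite_self, Nat.sub_zero]
    rcases lt_trichotomy a L with h | rfl | h
    · rw [if_pos h, if_neg (show ¬ L = a from by omega)]
      omega
    · rw [if_neg (lt_irrefl a), if_pos rfl]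
      omega
    · rw [if_neg (show ¬ a < L from by omega), if_neg (show ¬ L = a from by omega), hgt a h]
  | succ k ih =>
    intro L h1 h2
    have hpred := ov_pred (↑works) L
    have hnn := ov_nonneg (↑works) L
    have hne' := iter_ne_nil works hne k
    obtain ⟨h, t, hstep, hws, hmax⟩ := step_shape _ hne'
    rw [Function.iterate_succ_apply', hstep]
    by_cases hcase : ov (↑works) L ≤ (k : Int)
    · -- same level L, remainder grows by one
      have h2' : (k : Int) < ov (↑works) (L - 1) := by push_cast at h2; omega
      have hD := ih L hcase h2'
      have hrc : ((k : Int) - ov (↑works) L).toNat < cnt (↑works) L := by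
        push_cast at h2; omega
      have hhL : h = L := by
        have hmem : h ∈ Dcfg (↑works) L (((k : Int) - ov (↑works) L).toNat) := by
          rw [← hD, hws]; exact Multiset.mem_cons_self _ _
        have hle1 : h ≤ L := max_of_Dcfg _ _ _ _ hmem
        have hmem2 : L ∈ (↑(stepA^[k] works) : Multiset Int) := by
          rw [hD]; exact L_mem_Dcfg _ _ _ hrc
        exact le_antisymm hle1 (hmax L (Multiset.mem_coe.mp hmem2))
      subst hhL
      have hc : ∀ a : Int, Multiset.count a (↑t) + (if a = h then 1 else 0)
          = Multiset.count a (Dcfg (↑works) h (((k : Int) - ov (↑works) h).toNat)) := by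
        intro a
        rw [← hD, hws, Multiset.count_cons]
      refine Multiset.ext.mpr fun a => ?_
      have hca := hc a
      rw [show (((h - 1) :: t : List Int) : Multiset Int) = (h - 1) ::ₘ ↑t from rfl,
        Multiset.count_cons]
      simp only [Dcfg, Multiset.count_add, Multiset.count_filter, Multiset.count_replicate]
        at hca ⊢
      push_cast at h2 ⊢
      rcases eq_or_ne a h with rfl | hne1
      · split_ifs at hca ⊢ <;> omega
      · rcases eq_or_ne a (h - 1) with rfl | hne2
        · split_ifs at hca ⊢ <;> omega
        · split_ifs at hca ⊢ <;> omega
    · -- ov works L = k + 1: the cap level for k is L + 1, the new remainder at L is 0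
      have hovL : ov (↑works) L = (k : Int) + 1 := by push_cast at h1; omega
      have hpred1 : ov (↑works) (L + 1 - 1) = ov (↑works) (L + 1) + (cnt (↑works) (L + 1) : Int) :=
        ov_pred (↑works) (L + 1)
      rw [show (L + 1 - 1 : Int) = L from by ring] at hpred1
      have hcnt1 : 1 ≤ cnt (↑works) (L + 1) := by
        by_contra hcon
        have h0 : Multiset.filter (fun w => L + 1 ≤ w) (↑works : Multiset Int) = 0 :=
          Multiset.card_eq_zero.mp (by simp only [cnt] at hcon; omega)
        have hall : ∀ w ∈ (↑works : Multiset Int), w ≤ L := by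
          intro w hw
          by_contra hwL
          have hwmem : w ∈ Multiset.filter (fun w => L + 1 ≤ w) (↑works : Multiset Int) :=
            Multiset.mem_filter.mpr ⟨hw, by omega⟩
          rw [h0] at hwmem
          simp at hwmem
        have := ov_eq_zero_of_le (↑works) L hall
        omega
      have hD := ih (L + 1) (by omega) (by rw [show (L + 1 - 1 : Int) = L from by ring]; omega)
      have hr0 : (((k : Int)) - ov (↑works) (L + 1)).toNat = cnt (↑works) (L + 1) - 1 := by
        omega
      rw [hr0] at hD
      have hrc : cnt (↑works) (L + 1) - 1 < cnt (↑works) (L + 1) := by omega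
      have hhL : h = L + 1 := by
        have hmem : h ∈ Dcfg (↑works) (L + 1) (cnt (↑works) (L + 1) - 1) := by
          rw [← hD, hws]; exact Multiset.mem_cons_self _ _
        have hle1 : h ≤ L + 1 := max_of_Dcfg _ _ _ _ hmem
        have hmem2 : L + 1 ∈ (↑(stepA^[k] works) : Multiset Int) := by
          rw [hD]; exact L_mem_Dcfg _ _ _ hrc
        exact le_antisymm hle1 (hmax (L + 1) (Multiset.mem_coe.mp hmem2))
      subst hhL
      have hc : ∀ a : Int, Multiset.count a (↑t) + (if a = L + 1 then 1 else 0)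
          = Multiset.count a (Dcfg (↑works) (L + 1) (cnt (↑works) (L + 1) - 1)) := by
        intro a
        rw [← hD, hws, Multiset.count_cons]
      have hsucc := cnt_succ (↑works) L
      refine Multiset.ext.mpr fun a => ?_
      have hca := hc a
      rw [show (((L + 1 - 1) :: t : List Int) : Multiset Int) = (L + 1 - 1) ::ₘ ↑t from rfl,
        Multiset.count_cons]
      rw [show ((((k : Nat) + 1 : Nat) : Int) - ov (↑works) L).toNat = 0 from by push_cast; omega]
      simp only [Dcfg, Multiset.count_add, Multiset.count_filter, Multiset.count_replicate,
        ite_self, Nat.sub_zero] at hca ⊢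
      rw [show (L + 1 - 1 : Int) = L from by ring] at hca ⊢
      rcases eq_or_ne a L with rfl | hne1
      · split_ifs at hca ⊢ <;> omega
      · rcases eq_or_ne a (L + 1) with rfl | hne2
        · split_ifs at hca ⊢ <;> omega
        · split_ifs at hca ⊢ <;> omega

theorem bsearchB_spec (works : List Int) (k : Int) :
    ∀ (n : Nat) (lo hi : Int), (hi - lo).toNat ≤ n → lo ≤ hi →
      overB works hi ≤ k → k < overB works (lo - 1) →
      overB works (bsearchB works k lo hi) ≤ k ∧ k < overB works (bsearchB works k lo hi - 1) ∧
      lo ≤ bsearchB works k lo hi ∧ bsearchB works k lo hi ≤ hi := by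
  intro n
  induction n with
  | zero =>
    intro lo hi hn hle h1 h2
    have he : lo = hi := by omega
    subst he
    rw [bsearchB, if_neg (by omega)]
    exact ⟨h1, h2, le_refl _, le_refl _⟩
  | succ n ih =>
    intro lo hi hn hle h1 h2
    rw [bsearchB]
    by_cases hlt : lo < hi
    · rw [if_pos hlt]
      have hmid := PySem.Int.floordiv_two_mid_bounds (le_of_lt hlt)
      have hmidlt : PySem.Int.floordiv (lo + hi) 2 < hi :=
        (PySem.Int.floordiv_lt_iff_lt_mul (by omega : (0:Int) < 2)).mpr (by omega)
      by_cases hov : overB works (PySem.Int.floordiv (lo + hi) 2) ≤ k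
      · rw [if_pos hov]
        obtain ⟨c1, c2, c3, c4⟩ := ih lo (PySem.Int.floordiv (lo + hi) 2)
          (by omega) (by omega) hov h2
        exact ⟨c1, c2, c3, by omega⟩
      · rw [if_neg hov]
        have h2' : k < overB works ((PySem.Int.floordiv (lo + hi) 2 + 1) - 1) := by
          rw [show PySem.Int.floordiv (lo + hi) 2 + 1 - 1 = PySem.Int.floordiv (lo + hi) 2
            from by ring]
          omega
        obtain ⟨c1, c2, c3, c4⟩ := ih (PySem.Int.floordiv (lo + hi) 2 + 1) hi
          (by omega) (by omega) h1 h2'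
        exact ⟨c1, c2, by omega, c4⟩
    · rw [if_neg hlt]
      have he : lo = hi := by omega
      exact ⟨by rw [he]; exact h1, h2, le_refl _, by omega⟩

theorem foldl_stepA (l : List Int) (init : List Int) :
    (l.foldl (fun ws _ => stepA ws) init) = stepA^[l.length] init := by
  induction l generalizing init with
  | nil => simp
  | cons a l ih =>
    simp only [List.foldl_cons, List.length_cons, ih, Function.iterate_succ_apply]

theorem foldl_sq (l : List Int) (init : Int) :
    l.foldl (fun acc w => if 0 < w then acc + w ^ 2 else acc) init = init + sqsum (↑l) := by
  induction l generalizing init with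
  | nil => simp [sqsum]
  | cons a l ih =>
    rw [List.foldl_cons, ih,
      show ((a :: l : List Int) : Multiset Int) = a ::ₘ ↑l from rfl]
    simp only [sqsum, Multiset.map_cons, Multiset.sum_cons]
    by_cases h : 0 < a
    · rw [if_pos h]; simp only [sqi, if_pos h]; ring
    · rw [if_neg h]; simp only [sqi, if_neg h]; ring

theorem filter_pos_sum (l : List Int) :
    ((l.filter (fun w => 0 < w)).map (fun w => w * w)).sum = sqsum (↑l) := by
  induction l with
  | nil => simp [sqsum]
  | cons a l ih =>
    rw [show ((a :: l : List Int) : Multiset Int) = a ::ₘ ↑l from rfl]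
    simp only [List.filter_cons, decide_eq_true_eq, sqsum, Multiset.map_cons, Multiset.sum_cons]
    simp only [sqsum] at ih
    by_cases h : 0 < a
    · rw [if_pos h]
      simp only [List.map_cons, List.sum_cons, sqi, if_pos h, ih]
    · rw [if_neg h]
      simp only [sqi, if_neg h, ih]
      omega

theorem filter_lt_sum (l : List Int) (L : Int) :
    ((l.filter (fun w => 0 < w ∧ w < L)).map (fun w => w * w)).sum
      = sqsum ((↑l : Multiset Int).filter (fun w => w < L)) := by
  induction l with
  | nil => simp [sqsum]
  | cons a l ih =>
    rw [show ((a :: l : List Int) : Multiset Int) = a ::ₘ ↑l from rfl, Multiset.filter_cons]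
    simp only [List.filter_cons, decide_eq_true_eq]
    by_cases h1 : a < L
    · rw [if_pos h1]
      simp only [sqsum, Multiset.map_add, Multiset.sum_add, Multiset.map_singleton,
        Multiset.sum_singleton]
      simp only [sqsum] at ih
      by_cases h2 : 0 < a
      · rw [if_pos (by exact ⟨h2, h1⟩)]
        simp only [List.map_cons, List.sum_cons, sqi, if_pos h2, ih]
      · rw [if_neg (by omega)]
        simp only [sqi, if_neg h2, ih]
        omega
    · rw [if_neg (by omega), if_neg (by omega)]
      simp only [Multiset.zero_add]
      exact ih

theorem sqsum_nonneg (M : Multiset Int) : 0 ≤ sqsum M := by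
  refine Multiset.sum_nonneg fun x hx => ?_
  obtain ⟨w, _, rfl⟩ := Multiset.mem_map.mp hx
  simp only [sqi]
  split_ifs with h
  · exact mul_nonneg (by omega) (by omega)
  · exact le_refl 0

theorem sqsum_Dcfg (M : Multiset Int) (L : Int) (r : Nat) :
    sqsum (Dcfg M L r) = sqsum (M.filter (fun w => w < L)) + (r : Int) * sqi (L - 1)
      + ((cnt M L - r : Nat) : Int) * sqi L := by
  simp [Dcfg, sqsum, Multiset.map_replicate, Multiset.sum_replicate]

-- ===== VERDICT (by name: the statement is the Claim_ definition above) =====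
theorem solution_spec : Claim_equal_solution := by
  intro no works _ hpre
  unfold Spec_solution
  by_cases hno : 0 < no
  · -- at least one decrement: works ≠ [] from Pre_
    have hne : works ≠ [] := by
      rcases hpre with h | h
      · exact h
      · omega
    -- A's value: sqsum of the state after no.toNat steps
    have hlen : (PySem.List.pyRange 0 no 1).length = no.toNat := by
      rw [PySem.List.length_pyRange_one]
      congr 1
      omega
    have hA : solution no works = sqsum (↑(stepA^[no.toNat] works)) := by
      simp only [solution]
      rw [foldl_stepA, hlen, foldl_sq, zero_add]
      exact if_neg (not_lt.mpr (sqsum_nonneg _))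
    cases hm : PySem.List.max? works (fun x => x) with
    | none => exact absurd ((PySem.List.max?_eq_none_iff works _).mp hm) hne
    | some m =>
      have hmmem : m ∈ works := PySem.List.max?_mem hm
      have hmmax : ∀ y ∈ works, y ≤ m := PySem.List.max?_isMax hm
      -- initial binary-search invariants
      have hhi : overB works m ≤ no := by
        rw [overB_eq_ov, ov_eq_zero_of_le _ _ (fun w hw => hmmax w (Multiset.mem_coe.mp hw))]
        omega
      have hlo : no < overB works ((m - no) - 1) := by
        rw [overB_eq_ov]
        have hb := le_ov_of_mem (↑works) (m - no - 1) m (Multiset.mem_coe.mpr hmmem)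
        rw [max_eq_left (by omega : (0:Int) ≤ m - (m - no - 1))] at hb
        omega
      obtain ⟨hb1, hb2, _, _⟩ := bsearchB_spec works no ((m - (m - no)).toNat) (m - no) m
        (le_refl _) (by omega) hhi hlo
      rw [overB_eq_ov] at hb1 hb2
      have hcast : ((no.toNat : Int)) = no := Int.toNat_of_nonneg (by omega)
      have hshape := iter_shape works hne no.toNat (bsearchB works no (m - no) m)
        (by rw [hcast]; exact hb1) (by rw [hcast]; exact hb2)
      rw [hcast] at hshape
      rw [hA, hshape, sqsum_Dcfg]
      -- reduce B to its positive branch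
      simp only [solution_alt]
      rw [if_pos hno,
        if_neg (show ¬ (no = 0 ∨ works = []) from fun hor => hor.elim (fun h => by omega) (fun h => hne h)),
        hm]
      dsimp only
      set level := bsearchB works no (m - no) m with hlevel
      -- identify B's pieces with the spec quantities
      have hnn := ov_nonneg (↑works) level
      have hpred := ov_pred (↑works) level
      rw [overB_eq_ov, filter_lt_sum, ← cnt_coe]
      rw [show (((no - ov (↑works) level).toNat : Int)) = no - ov (↑works) level from by omega]
      rw [show (((cnt (↑works) level - (no - ov (↑works) level).toNat : Nat)) : Int)
          = (cnt (↑works) level : Int) - (no - ov (↑works) level) from by omega]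
      by_cases hL0 : 0 < level
      · rw [if_pos hL0]
        by_cases hL1 : 1 < level
        · rw [if_pos hL1]
          simp only [sqi, if_pos (show (0:Int) < level - 1 from by omega), if_pos hL0]
          ring
        · rw [if_neg hL1]
          simp only [sqi, if_neg (show ¬ (0:Int) < level - 1 from by omega), if_pos hL0]
          ring
      · rw [if_neg hL0, if_neg (show ¬ (1:Int) < level from by omega)]
        simp only [sqi, if_neg (show ¬ (0:Int) < level - 1 from by omega), if_neg hL0]
        ring
  · -- no ≤ 0: A's loop runs zero times and B takes its k = 0 branch
    simp only [solution, solution_alt]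
    rw [if_neg hno, if_pos (Or.inl rfl),
      PySem.List.pyRange_one_eq_nil (by omega : no ≤ 0), List.foldl_nil, foldl_sq, zero_add,
      if_neg (not_lt.mpr (sqsum_nonneg _)), filter_pos_sum]
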